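-- pv_equiv track=rewrite | github.com/leezh/advent_2023 | day12/part1.py | is_possible_layout
-- ===== SOURCE A (Python) =====
-- def is_possible_layout(records: str, groupings: list[int], offsets: list[int]) -> bool:
--     for size, offset, next_offset in zip(groupings[:-1], offsets[:-1], offsets[1:]):
--         if size + offset >= next_offset:
--             return False
--     for position, c in enumerate(records):
--         if c == "?":
--             continue
--         is_group = False
--         for size, offset in zip(groupings, offsets):
--             if offset <= position < offset + size:
--                 is_group = True
--                 break
--         if (c == "#") != is_group:
--             return False
--     return True
-- ===== SOURCE B (Python) =====
-- def is_possible_layout(records: str, groupings: list[int], offsets: list[int]) -> bool: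
--     if any(s + o >= nx for s, o, nx in zip(groupings[:-1], offsets[:-1], offsets[1:])):
--         return False
--     n = len(records)
--     mask = [False] * n
--     for size, offset in zip(groupings, offsets):
--         for p in range(max(offset, 0), min(offset + size, n)):
--             mask[p] = True
--     return all(c == "?" or (c == "#") == m for c, m in zip(records, mask))
-- ===== Notes on version B (the rewrite author's own statement) =====
-- stated objective: alternative
-- what changed: B precomputes a boolean mask of group-covered positions once (intervals clamped to the string) and checks each character against the mask, replacing A's inner scan over all (size, offset) pairs at every non-'?' character.
import Mathlib
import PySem

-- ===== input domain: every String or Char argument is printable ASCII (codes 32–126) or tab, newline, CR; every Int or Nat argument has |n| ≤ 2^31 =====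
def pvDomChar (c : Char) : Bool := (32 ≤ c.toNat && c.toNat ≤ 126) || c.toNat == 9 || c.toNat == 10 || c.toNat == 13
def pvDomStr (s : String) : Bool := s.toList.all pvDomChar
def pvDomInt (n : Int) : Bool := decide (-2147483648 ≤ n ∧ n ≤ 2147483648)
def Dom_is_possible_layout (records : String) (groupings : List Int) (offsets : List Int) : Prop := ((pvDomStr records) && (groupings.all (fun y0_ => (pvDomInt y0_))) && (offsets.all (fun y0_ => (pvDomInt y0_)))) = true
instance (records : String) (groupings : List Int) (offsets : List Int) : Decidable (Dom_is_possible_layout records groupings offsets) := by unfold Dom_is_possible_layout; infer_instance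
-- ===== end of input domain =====

-- B replaces A's per-character inner scan over all groups by a boolean mask of
-- group-covered positions built once (objective: alternative algorithm, similar cost).

-- ===== PORT A =====
def is_possible_layout (records : String) (groupings : List Int) (offsets : List Int) : Bool :=
  -- first loop: early return False ⇔ all triples pass
  if ((PySem.List.slice groupings none (some (-1))).zip
        ((PySem.List.slice offsets none (some (-1))).zip (PySem.List.slice offsets (some 1) none))).all
      (fun t => !decide (t.1 + t.2.1 ≥ t.2.2)) then
    -- second loop over enumerate(records), with the inner any-scan (break ⇔ any)
    (PySem.List.enumerate records.toList 0).all (fun pc =>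
      if pc.2 = '?' then true
      else (decide (pc.2 = '#')
              == (groupings.zip offsets).any (fun so => decide (so.2 ≤ pc.1 ∧ pc.1 < so.2 + so.1))))
  else false

-- ===== PORT B =====
-- inner marking loop of B: for p in range(lo, hi): mask[p] = True
def pvMark (m : List Bool) (lo hi : Int) : List Bool :=
  (PySem.List.pyRange lo hi 1).foldl (fun m2 q => m2.set q.toNat true) m

def is_possible_layout_alt (records : String) (groupings : List Int) (offsets : List Int) : Bool :=
  if ((PySem.List.slice groupings none (some (-1))).zip
        ((PySem.List.slice offsets none (some (-1))).zip (PySem.List.slice offsets (some 1) none))).any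
      (fun t => decide (t.1 + t.2.1 ≥ t.2.2)) then
    false
  else
    let n := records.toList.length
    let mask := (groupings.zip offsets).foldl
      (fun m so => pvMark m (max so.2 0) (min (so.2 + so.1) (n : Int)))
      (List.replicate n false)
    (records.toList.zip mask).all (fun cm => (cm.1 == '?') || (decide (cm.1 = '#') == cm.2))

-- ===== PRECONDITION & SPEC =====
def Spec_is_possible_layout (records : String) (groupings : List Int) (offsets : List Int) (out : Bool) : Prop := out = is_possible_layout_alt records groupings offsets
instance (records : String) (groupings : List Int) (offsets : List Int) (out : Bool) : Decidable (Spec_is_possible_layout records groupings offsets out) := by unfold Spec_is_possible_layout; infer_instance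

-- ===== CLAIM (what is proved, stated in full; the proofs are below) =====
def Claim_equal_is_possible_layout : Prop := ∀ (records : String) (groupings : List Int) (offsets : List Int), Dom_is_possible_layout records groupings offsets → Spec_is_possible_layout records groupings offsets (is_possible_layout records groupings offsets)

-- ===== LEMMAS AND PROOFS =====

theorem pvMark_length (lo hi : Int) (m : List Bool) : (pvMark m lo hi).length = m.length := by
  unfold pvMark
  induction PySem.List.pyRange lo hi 1 generalizing m with
  | nil => rfl
  | cons q r ih => simpa [List.foldl] using ih (m.set q.toNat true)

theorem pvMark_getD_aux (t : Nat) : ∀ (lo hi : Int) (m : List Bool) (p : Nat),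
    (hi - lo).toNat = t → 0 ≤ lo → p < m.length →
    (pvMark m lo hi).getD p false = (m.getD p false || decide (lo ≤ (p : Int) ∧ (p : Int) < hi)) := by
  induction t with
  | zero =>
    intro lo hi m p ht hlo hp
    have hle : hi ≤ lo := by omega
    unfold pvMark
    rw [PySem.List.pyRange_one_eq_nil hle]
    have : decide (lo ≤ (p : Int) ∧ (p : Int) < hi) = false := by
      simp only [decide_eq_false_iff_not]; omega
    simp [this]
  | succ t ih =>
    intro lo hi m p ht hlo hp
    have hlt : lo < hi := by omega
    unfold pvMark
    rw [PySem.List.pyRange_one_cons hlt]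
    simp only [List.foldl_cons]
    have step := ih (lo + 1) hi (m.set lo.toNat true) p (by omega) (by omega) (by simpa using hp)
    unfold pvMark at step
    rw [step]
    by_cases hpl : p = lo.toNat
    · have h1 : (m.set lo.toNat true).getD p false = true := by
        subst hpl
        simp [List.getD_eq_getElem?_getD, hp]
      have h2 : decide (lo ≤ (p : Int) ∧ (p : Int) < hi) = true := by
        simp only [decide_eq_true_iff]
        constructor <;> omega
      rw [h1, h2]
      simp
    · have h1 : (m.set lo.toNat true).getD p false = m.getD p false := by
        simp [List.getD_eq_getElem?_getD, List.getElem?_set_ne (by omega : lo.toNat ≠ p)]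
      have h2 : decide (lo + 1 ≤ (p : Int) ∧ (p : Int) < hi)
          = decide (lo ≤ (p : Int) ∧ (p : Int) < hi) := by
        simp only [decide_eq_decide]
        have : (p : Int) ≠ lo := by omega
        omega
      rw [h1, h2]

theorem pvMark_getD (lo hi : Int) (m : List Bool) (p : Nat)
    (hlo : 0 ≤ lo) (hp : p < m.length) :
    (pvMark m lo hi).getD p false = (m.getD p false || decide (lo ≤ (p : Int) ∧ (p : Int) < hi)) :=
  pvMark_getD_aux (hi - lo).toNat lo hi m p rfl hlo hp

theorem mask_getD (pairs : List (Int × Int)) (n : Nat) (m : List Bool) (p : Nat)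
    (hlen : m.length = n) (hp : p < n) :
    (pairs.foldl (fun m2 so => pvMark m2 (max so.2 0) (min (so.2 + so.1) (n : Int))) m).getD p false
      = (m.getD p false || pairs.any (fun so => decide (so.2 ≤ (p : Int) ∧ (p : Int) < so.2 + so.1))) := by
  induction pairs generalizing m with
  | nil => simp
  | cons so rest ih =>
    simp only [List.foldl_cons, List.any_cons]
    rw [ih (pvMark m (max so.2 0) (min (so.2 + so.1) (n : Int)))
        (by rw [pvMark_length, hlen])]
    rw [pvMark_getD _ _ m p (le_max_right _ _) (hlen ▸ hp)]
    have hpi : (p : Int) < (n : Int) := by exact_mod_cast hp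
    have hdec : decide (max so.2 0 ≤ (p : Int) ∧ (p : Int) < min (so.2 + so.1) (n : Int))
        = decide (so.2 ≤ (p : Int) ∧ (p : Int) < so.2 + so.1) := by
      simp only [decide_eq_decide, max_le_iff, lt_min_iff]
      omega
    rw [hdec, Bool.or_assoc]

theorem mask_length (pairs : List (Int × Int)) (n : Int) (m : List Bool) :
    (pairs.foldl (fun m2 so => pvMark m2 (max so.2 0) (min (so.2 + so.1) n)) m).length = m.length := by
  induction pairs generalizing m with
  | nil => rfl
  | cons so rest ih => simpa [List.foldl_cons, pvMark_length] using ih (pvMark m _ _)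

theorem all_index {α : Type} (l : List α) (p : α → Bool) :
    l.all p = true ↔ ∀ (k : Nat) (h : k < l.length), p l[k] = true := by
  rw [List.all_eq_true]
  constructor
  · intro h k hk; exact h _ (l.getElem_mem hk)
  · intro h x hx
    rcases List.mem_iff_getElem.1 hx with ⟨k, hk, rfl⟩
    exact h k hk

-- ===== VERDICT (by name: the statement is the Claim_ definition above) =====
theorem is_possible_layout_spec : Claim_equal_is_possible_layout := by
  intro records groupings offsets _
  unfold Spec_is_possible_layout is_possible_layout is_possible_layout_alt
  by_cases hall : (((PySem.List.slice groupings none (some (-1))).zip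
        ((PySem.List.slice offsets none (some (-1))).zip (PySem.List.slice offsets (some 1) none))).all
      (fun t => !decide (t.1 + t.2.1 ≥ t.2.2))) = true
  · rw [if_pos hall]
    have hany : (((PySem.List.slice groupings none (some (-1))).zip
        ((PySem.List.slice offsets none (some (-1))).zip (PySem.List.slice offsets (some 1) none))).any
      (fun t => decide (t.1 + t.2.1 ≥ t.2.2))) = false := by
      rw [List.any_eq_false]
      intro t ht
      simpa using List.all_eq_true.1 hall t ht
    rw [if_neg (by simp [hany])]
    simp only []
    have hml : ((groupings.zip offsets).foldl
        (fun m so => pvMark m (max so.2 0) (min (so.2 + so.1) (records.toList.length : Int)))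
        (List.replicate records.toList.length false)).length = records.toList.length := by
      rw [mask_length, List.length_replicate]
    have hmk : ∀ (k : Nat) (hk : k < records.toList.length),
        ((groupings.zip offsets).foldl
          (fun m so => pvMark m (max so.2 0) (min (so.2 + so.1) (records.toList.length : Int)))
          (List.replicate records.toList.length false))[k]'(by rw [hml]; exact hk)
        = (groupings.zip offsets).any (fun so => decide (so.2 ≤ (k : Int) ∧ (k : Int) < so.2 + so.1)) := by
      intro k hk
      rw [← List.getD_eq_getElem _ false (by rw [hml]; exact hk),
        mask_getD (groupings.zip offsets) records.toList.length _ k (by simp) hk]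
      simp
    rw [Bool.eq_iff_iff, all_index, all_index]
    constructor
    · intro h k hk
      rw [List.length_zip, hml, min_self] at hk
      have hA := h k (by simpa [PySem.List.length_enumerate] using hk)
      rw [PySem.List.getElem_enumerate] at hA
      simp only [zero_add] at hA
      simp only [List.getElem_zip]
      by_cases hq : records.toList[k] = '?'
      · simp [hq]
      · simp only [if_neg hq] at hA
        rw [hmk k hk]
        simpa [hq] using hA
    · intro h k hk
      have hn : k < records.toList.length := by
        simpa [PySem.List.length_enumerate] using hk
      have hB := h k (by rw [List.length_zip, hml, min_self]; exact hn)
      simp only [List.getElem_zip] at hB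
      rw [PySem.List.getElem_enumerate]
      simp only [zero_add]
      by_cases hq : records.toList[k] = '?'
      · simp [hq]
      · have hcq : (records.toList[k] == '?') = false := by simpa using hq
        simp only [hcq, Bool.false_or] at hB
        rw [hmk k hn] at hB
        rw [if_neg hq]
        exact hB
  · rw [if_neg hall]
    have hany : (((PySem.List.slice groupings none (some (-1))).zip
        ((PySem.List.slice offsets none (some (-1))).zip (PySem.List.slice offsets (some 1) none))).any
      (fun t => decide (t.1 + t.2.1 ≥ t.2.2))) = true := by
      rcases List.all_eq_false.1 (Bool.eq_false_iff.mpr hall) with ⟨t, ht, hpt⟩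
      exact List.any_eq_true.2 ⟨t, ht, by simpa using hpt⟩
    rw [if_pos hany]
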